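-- pv_equiv track=rewrite | github.com/shomeh6188/Projects | QuestionAnswering/helper.py | findNNP
-- ===== SOURCE A (Python) =====
-- def findNNP(sent_tagged):
--     #i = [x for x in sent_tagged if x[1] == "NNP" or x[1] == "NNPS"]
--     nnp = []
--     flag = 0
--     s = None
--     for x in sent_tagged:
--         if x[1] == "NNP" and flag == 0:
--             s = x[0]
--             flag = 1
--         elif x[1] == "NNP" and flag == 1:
--             s = s + " " + x[0]
--         else:
--             if s != None:
--                 nnp.append(s)
--             s = None
--             flag = 0
--     if sent_tagged[-1][1] == "NNP":
--         nnp.append(s)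
--     #for x in i:
--         #sent_tagged.remove(x)
--     return nnp
-- ===== SOURCE B (Python) =====
-- def findNNP(sent_tagged):
--     # Two-pointer run scan: find each maximal consecutive run of NNP tags,
--     # join its words, and skip past it.
--     res = []
--     i = 0
--     n = len(sent_tagged)
--     while i < n:
--         if sent_tagged[i][1] == "NNP":
--             j = i
--             while j < n and sent_tagged[j][1] == "NNP":
--                 j += 1
--             res.append(" ".join(w for w, _ in sent_tagged[i:j]))
--             i = j
--         else:
--             i += 1
--     return res
-- ===== Notes on version B (the rewrite author's own statement) =====
-- stated objective: alternative
-- what changed: Replaced the flag/accumulator state machine with an explicit two-pointer run scan that finds each maximal consecutive NNP run and joins its words with str.join.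
-- crash fix: On the empty list A raises IndexError (it indexes sent_tagged[-1] after the loop) while B naturally returns []. — e.g. on findNNP([]): A raises IndexError, B returns []
import Mathlib
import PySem

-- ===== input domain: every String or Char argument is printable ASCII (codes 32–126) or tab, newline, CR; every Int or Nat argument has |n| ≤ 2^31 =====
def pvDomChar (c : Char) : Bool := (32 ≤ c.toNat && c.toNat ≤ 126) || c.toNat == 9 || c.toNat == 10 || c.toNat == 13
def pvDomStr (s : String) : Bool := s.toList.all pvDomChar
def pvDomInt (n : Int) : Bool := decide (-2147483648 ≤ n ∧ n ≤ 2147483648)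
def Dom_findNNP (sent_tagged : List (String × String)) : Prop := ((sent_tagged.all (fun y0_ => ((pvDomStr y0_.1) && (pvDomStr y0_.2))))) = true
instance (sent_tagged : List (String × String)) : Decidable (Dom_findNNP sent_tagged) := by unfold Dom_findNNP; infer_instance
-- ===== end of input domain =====

-- B replaces A's flag/accumulator state machine with a run scan over maximal
-- consecutive NNP runs, joining each run's words; same cost, different decomposition.

-- ===== PORT A =====
-- state = (nnp, flag, s): the list built so far, the 0/1 flag, the current run (None = no run)
def findNNPStep (acc : List String × Int × Option String) (x : String × String) :
    List String × Int × Option String :=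
  if x.2 == "NNP" && acc.2.1 == 0 then (acc.1, 1, some x.1)
  else if x.2 == "NNP" && acc.2.1 == 1 then (acc.1, 1, some (acc.2.2.getD "" ++ " " ++ x.1))
  else ((match acc.2.2 with | some v => acc.1 ++ [v] | none => acc.1), 0, none)

def findNNP (sent_tagged : List (String × String)) : List String :=
  let st := sent_tagged.foldl findNNPStep ([], 0, none)
  match PySem.List.pyGet? sent_tagged (-1) with
  | none => []   -- sent_tagged[-1] raises IndexError on []; excluded by Pre_
  | some last => if last.2 == "NNP" then st.1 ++ [st.2.2.getD ""] else st.1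

-- ===== PORT B =====
-- the inner 'while j < n and …' scan: words of the maximal NNP run and the remainder
def spanNNP : List (String × String) → List String × List (String × String)
  | [] => ([], [])
  | x :: xs =>
    if x.2 == "NNP" then
      let r := spanNNP xs
      (x.1 :: r.1, r.2)
    else ([], x :: xs)

theorem spanNNP_snd_length_le (l : List (String × String)) : (spanNNP l).2.length ≤ l.length := by
  induction l with
  | nil => simp [spanNNP]
  | cons x xs ih =>
    simp only [spanNNP]
    split
    · exact Nat.le_succ_of_le ih
    · exact Nat.le_refl _

def findNNP_alt (sent_tagged : List (String × String)) : List String :=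
  match sent_tagged with
  | [] => []
  | x :: xs =>
    if x.2 == "NNP" then
      let r := spanNNP xs
      PySem.Str.join " " (x.1 :: r.1) :: findNNP_alt r.2
    else
      findNNP_alt xs
  termination_by sent_tagged.length
  decreasing_by
  · exact Nat.lt_succ_of_le (spanNNP_snd_length_le xs)
  · exact Nat.lt_succ_self _

-- ===== PRECONDITION & SPEC =====
-- A evaluates sent_tagged[-1] after the loop, so it raises IndexError on the empty list.
def Pre_findNNP (sent_tagged : List (String × String)) : Prop := sent_tagged ≠ []
instance (sent_tagged : List (String × String)) : Decidable (Pre_findNNP sent_tagged) := by unfold Pre_findNNP; infer_instance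
def pvWitness_findNNP : (List (String × String)) := [("John", "NNP"), ("runs", "VBZ")]

-- On the empty list A raises IndexError while B naturally returns [].
def Raises_findNNP (sent_tagged : List (String × String)) : Prop := sent_tagged = []
instance (sent_tagged : List (String × String)) : Decidable (Raises_findNNP sent_tagged) := by unfold Raises_findNNP; infer_instance
def pvRaiseWitness_findNNP : (List (String × String)) := []
def pvRaiseWitnessOut_findNNP : List String := []

def Spec_findNNP (sent_tagged : List (String × String)) (out : List String) : Prop := out = findNNP_alt sent_tagged
instance (sent_tagged : List (String × String)) (out : List String) : Decidable (Spec_findNNP sent_tagged out) := by unfold Spec_findNNP; infer_instance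

-- ===== CLAIM (what is proved, stated in full; the proofs are below) =====
def Claim_equal_findNNP : Prop := ∀ (sent_tagged : List (String × String)), Dom_findNNP sent_tagged → Pre_findNNP sent_tagged → Spec_findNNP sent_tagged (findNNP sent_tagged)
def Claim_raises_findNNP : Prop := (∀ (sent_tagged : List (String × String)), Dom_findNNP sent_tagged → Raises_findNNP sent_tagged → ¬ Pre_findNNP sent_tagged) ∧ (Dom_findNNP (pvRaiseWitness_findNNP) ∧ Raises_findNNP (pvRaiseWitness_findNNP) ∧ findNNP_alt (pvRaiseWitness_findNNP) = pvRaiseWitnessOut_findNNP)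

-- ===== LEMMAS AND PROOFS =====

-- flush: the final 'if … : nnp.append(s)', expressed on the state
def findNNPFlush (st : List String × Int × Option String) : List String :=
  match st.2.2 with
  | some v => st.1 ++ [v]
  | none => st.1

-- A's loop, rephrased recursively on the input, carrying the current run
def findNNPEmit : Option String → List (String × String) → List String
  | s, [] => s.toList
  | s, x :: xs =>
    if x.2 == "NNP" then
      findNNPEmit (some (match s with | none => x.1 | some v => v ++ " " ++ x.1)) xs
    else s.toList ++ findNNPEmit none xs

theorem findNNP_fold_emit (l : List (String × String)) :
    ∀ (acc : List String) (s : Option String),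
      findNNPFlush (l.foldl findNNPStep (acc, (if s.isSome then 1 else 0 : Int), s)) =
        acc ++ findNNPEmit s l := by
  induction l with
  | nil =>
    intro acc s
    cases s <;> simp [findNNPFlush, findNNPEmit]
  | cons x xs ih =>
    intro acc s
    by_cases hx : x.2 = "NNP"
    · cases s with
      | none =>
        simpa [findNNPStep, findNNPEmit, hx] using ih acc (some x.1)
      | some v =>
        simpa [findNNPStep, findNNPEmit, hx] using ih acc (some (v ++ " " ++ x.1))
    · cases s with
      | none =>
        simpa [findNNPStep, findNNPEmit, hx] using ih acc none
      | some v =>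
        have := ih (acc ++ [v]) none
        simpa [findNNPStep, findNNPEmit, hx, List.append_assoc] using this
  
theorem findNNP_flag01 (l : List (String × String)) :
    ∀ (acc : List String) (f : Int) (s : Option String), (f = 0 ∨ f = 1) →
      ((l.foldl findNNPStep (acc, f, s)).2.1 = 0 ∨ (l.foldl findNNPStep (acc, f, s)).2.1 = 1) := by
  induction l with
  | nil => intro acc f s hf; exact hf
  | cons x xs ih =>
    intro acc f s hf
    simp only [List.foldl_cons, findNNPStep]
    split
    · exact ih _ _ _ (Or.inr rfl)
    · split
      · exact ih _ _ _ (Or.inr rfl)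
      · exact ih _ _ _ (Or.inl rfl)

theorem findNNP_fold_isSome (ys : List (String × String)) (last : String × String)
    (acc : List String) (f : Int) (s : Option String) (hf : f = 0 ∨ f = 1) :
    (((ys ++ [last]).foldl findNNPStep (acc, f, s)).2.2).isSome = (last.2 == "NNP") := by
  rw [List.foldl_append]
  have hfl := findNNP_flag01 ys acc f s hf
  rcases hres : ys.foldl findNNPStep (acc, f, s) with ⟨nnp, fl, st⟩
  rw [hres] at hfl
  by_cases hx : last.2 = "NNP" <;>
    rcases hfl with h | h <;> subst h <;> cases st <;>
    simp [findNNPStep, hx]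

theorem join_singleton_str (v : String) : PySem.Str.join " " [v] = v := by
  apply String.toList_inj.mp
  simp [PySem.Str.toList_join, PySem.Chars.join_singleton]

theorem join_cons_cons_str (v w : String) (r : List String) :
    PySem.Str.join " " (v :: w :: r) = v ++ " " ++ PySem.Str.join " " (w :: r) := by
  apply String.toList_inj.mp
  simp [PySem.Str.toList_join, PySem.Chars.join_cons_cons, String.toList_append]

theorem join_cons_shift (v w : String) (r : List String) :
    PySem.Str.join " " ((v ++ " " ++ w) :: r) = v ++ " " ++ PySem.Str.join " " (w :: r) := by
  apply String.toList_inj.mp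
  cases r with
  | nil =>
    simp [PySem.Str.toList_join, PySem.Chars.join_singleton, String.toList_append,
      List.append_assoc]
  | cons q qs =>
    simp [PySem.Str.toList_join, PySem.Chars.join_cons_cons, String.toList_append,
      List.append_assoc]

theorem emit_both (l : List (String × String)) :
    (findNNPEmit none l = findNNP_alt l) ∧
    (∀ v, findNNPEmit (some v) l =
      PySem.Str.join " " (v :: (spanNNP l).1) :: findNNP_alt (spanNNP l).2) := by
  induction l with
  | nil =>
    refine ⟨by simp [findNNPEmit, findNNP_alt], fun v => ?_⟩
    simp [findNNPEmit, spanNNP, findNNP_alt, join_singleton_str]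
  | cons x xs ih =>
    obtain ⟨ihn, ihs⟩ := ih
    by_cases hx : x.2 = "NNP"
    · constructor
      · rw [findNNP_alt]
        simp only [findNNPEmit, hx]
        simpa using ihs x.1
      · intro v
        simp only [findNNPEmit, if_pos (by simp [hx] : (x.2 == "NNP") = true)]
        rw [ihs (v ++ " " ++ x.1), join_cons_shift]
        simp [spanNNP, hx, join_cons_cons_str]
    · constructor
      · rw [findNNP_alt]
        simp only [findNNPEmit]
        simpa [hx] using ihn
      · intro v
        simp only [findNNPEmit, spanNNP]
        rw [findNNP_alt.eq_def]
        simp [hx, join_singleton_str, ihn]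

theorem emit_none (l : List (String × String)) :
    findNNPEmit none l = findNNP_alt l := (emit_both l).1

-- ===== VERDICT (by name: the statement is the Claim_ definition above) =====
theorem findNNP_spec : Claim_equal_findNNP := by
  intro l _ hpre
  unfold Spec_findNNP
  obtain ⟨ys, last, rfl⟩ : ∃ ys last, l = ys ++ [last] := by
    rcases List.eq_nil_or_concat l with h | ⟨ys, last, h⟩
    · exact absurd h hpre
    · exact ⟨ys, last, by simpa using h⟩
  simp only [findNNP, PySem.List.pyGet?_neg_one_append_singleton]
  have hfold := findNNP_fold_emit (ys ++ [last]) [] none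
  have hsome := findNNP_fold_isSome ys last [] 0 none (Or.inl rfl)
  simp only [Option.isSome_none, Bool.false_eq_true, if_false, List.nil_append] at hfold
  rw [← emit_none (ys ++ [last]), ← hfold]
  by_cases hx : last.2 = "NNP"
  · simp only [hx, if_pos (by simp : ("NNP" == "NNP") = true)]
    rw [show (last.2 == "NNP") = true by simp [hx]] at hsome
    cases hst : ((ys ++ [last]).foldl findNNPStep ([], 0, none)).2.2 with
    | none => rw [hst] at hsome; simp at hsome
    | some v =>
      simp only [findNNPFlush, List.foldl_append, List.foldl_cons, List.foldl_nil] at hst ⊢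
      rw [hst]
      simp
  · rw [if_neg (by simp [hx])]
    rw [show (last.2 == "NNP") = false by simp [hx]] at hsome
    cases hst : ((ys ++ [last]).foldl findNNPStep ([], 0, none)).2.2 with
    | none =>
      simp only [findNNPFlush, List.foldl_append, List.foldl_cons, List.foldl_nil] at hst ⊢
      rw [hst]
    | some v => rw [hst] at hsome; simp at hsome

def findNNP_raises : Claim_raises_findNNP := by
  unfold Claim_raises_findNNP
  refine ⟨fun l _ h => by simp [Raises_findNNP] at h; simp [Pre_findNNP, h],
    by decide, by decide, by simp [findNNP_alt, pvRaiseWitness_findNNP, pvRaiseWitnessOut_findNNP]⟩
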